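-- pv_equiv track=rewrite | github.com/IlhamFS/uTrip | ItineraryGenerator.py | table_reduction
-- ===== SOURCE A (Python) =====
-- def table_reduction(data_json):
--   data_json_baru = []
--   prev = {}
--   for idx,i in enumerate(data_json):
--     if idx > 0:
--       if i['name'] == prev['name']:
--         time_next = i['time'].split('-')
--         time_prev = prev['time'].split('-')
--         prev['time'] = time_prev[0]+'-'+time_next[1]
--       else:
--         data_json_baru.append(prev)
--         prev = i
--     else:
--       prev = i
--   if not (prev == {}):
--     data_json_baru.append(prev)
--
--   return data_json_baru
-- ===== SOURCE B (Python) =====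
-- def table_reduction(data_json):
--     # Run-based rewrite: scan each maximal run of consecutive same-name entries
--     # and merge its time range in one step from the run's first and last entry.
--     # (Like A, mutates the first dict of a merged run in place.)
--     result = []
--     n = len(data_json)
--     k = 0
--     while k < n:
--         first = data_json[k]
--         j = k + 1
--         while j < n and data_json[j]['name'] == first['name']:
--             j += 1
--         if j > k + 1:
--             first['time'] = first['time'].split('-')[0] + '-' + data_json[j - 1]['time'].split('-')[1]
--         result.append(first)
--         k = j
--     return result
-- ===== Notes on version B (the rewrite author's own statement) =====
-- stated objective: alternative
-- what changed: Replaces A's element-at-a-time accumulator (carried 'prev' dict merged incrementally and flushed on name change / at the end) with a run-at-a-time scan: an inner loop finds each maximal run of consecutive same-name entries and the merged time range is computed in one step from the run's first and last entry.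
-- intended difference: On the singleton list containing the empty dict, A returns [] (its final 'prev == {}' flush guard silently drops the entry) while B returns [{}]; a one-element input should reduce to itself, so B's value is the intended one. — e.g. on table_reduction([[]]): A returns [], B returns [[]]
import Mathlib
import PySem

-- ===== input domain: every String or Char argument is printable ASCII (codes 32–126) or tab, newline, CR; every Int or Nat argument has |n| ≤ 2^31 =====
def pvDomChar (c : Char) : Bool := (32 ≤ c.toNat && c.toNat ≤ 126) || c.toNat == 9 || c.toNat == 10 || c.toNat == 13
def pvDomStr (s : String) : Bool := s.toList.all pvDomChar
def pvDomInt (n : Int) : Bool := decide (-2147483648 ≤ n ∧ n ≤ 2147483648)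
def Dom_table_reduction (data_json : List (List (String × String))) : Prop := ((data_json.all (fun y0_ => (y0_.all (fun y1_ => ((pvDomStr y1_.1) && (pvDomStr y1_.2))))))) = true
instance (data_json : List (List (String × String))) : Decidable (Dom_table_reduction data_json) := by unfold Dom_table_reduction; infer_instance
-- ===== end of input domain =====

-- B rewrites A's carried-accumulator pass as a run-at-a-time scan (inner loop per maximal
-- same-name run, time range merged in one step from the run's first and last entry); both
-- Pythons mutate the first dict of a merged run in place, the equivalence is about the return value.

-- ===== PORT A =====
-- shared primitive accessors (both Pythons use the same d[k] / t.split('-') / l[i] expressions):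
-- d[k] (KeyError = missing key excluded by Pre_)
def pvGet (d : List (String × String)) (k : String) : String :=
  PySem.Dict.getD (⟨d⟩ : PySem.Dict String String) k ""
-- t.split('-')  (separator is non-empty, so Python never raises here)
def pvSplitDash (t : String) : List String := (PySem.Str.split? t "-").getD []
-- l[i] (IndexError excluded by Pre_)
def pvSeg (l : List String) (i : Int) : String := (PySem.List.pyGet? l i).getD ""
-- prev['time'] = time_prev[0] + '-' + time_next[1]  (the merge assignment both Pythons contain)
def pvMerge (prev i : List (String × String)) : List (String × String) :=
  (PySem.Dict.insert (⟨prev⟩ : PySem.Dict String String) "time"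
    (pvSeg (pvSplitDash (pvGet prev "time")) 0 ++ "-" ++ pvSeg (pvSplitDash (pvGet i "time")) 1)).items

-- the 'for idx,i in enumerate(data_json)' loop, state = (data_json_baru, prev)
def goA : List (List (String × String)) → Nat →
    List (List (String × String)) × List (String × String) →
    List (List (String × String)) × List (String × String)
  | [], _, st => st
  | i :: rest, idx, (baru, prev) =>
      goA rest (idx + 1)
        (if 0 < idx then
           (if pvGet i "name" = pvGet prev "name" then (baru, pvMerge prev i)
            else (baru ++ [prev], i))
         else (baru, i))

def table_reduction (data_json : List (List (String × String))) : List (List (String × String)) :=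
  let st := goA data_json 0 ([], [])
  if st.2 = [] then st.1 else st.1 ++ [st.2]

-- ===== PORT B =====
-- inner 'while j < n and data_json[j]['name'] == first['name']: j += 1'
-- (fuel argument only makes the while loop structurally total; xs.length steps always suffice)
def runEndB (xs : List (List (String × String))) (nm : String) : Nat → Nat → Nat
  | 0, j => j
  | fuel + 1, j =>
      if h : j < xs.length then
        (if pvGet xs[j] "name" = nm then runEndB xs nm fuel (j + 1) else j)
      else j

-- outer 'while k < n' loop, accumulator = result (fuel as above)
def goB (xs : List (List (String × String))) :
    Nat → Nat → List (List (String × String)) → List (List (String × String))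
  | 0, _, acc => acc
  | fuel + 1, k, acc =>
      if h : k < xs.length then
        let first := xs[k]
        let j := runEndB xs (pvGet first "name") xs.length (k + 1)
        let first' :=
          if k + 1 < j then
            pvMerge first ((PySem.List.pyGet? xs ((j : Int) - 1)).getD [])
          else first
        goB xs fuel j (acc ++ [first'])
      else acc

def table_reduction_alt (data_json : List (List (String × String))) : List (List (String × String)) :=
  goB data_json data_json.length 0 []

-- ===== PRECONDITION & SPEC =====
-- Pre_ = exactly the inputs where the Python A returns: with ≥ 2 entries every dict needs key 'name'
-- (i['name'] / prev['name'] would raise KeyError), and for every consecutive same-name pair the earlier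
-- dict needs key 'time' and the later dict's 'time' must split on '-' into ≥ 2 pieces (else
-- prev['time'] raises KeyError / time_next[1] raises IndexError).
def Pre_table_reduction (data_json : List (List (String × String))) : Prop :=
  (2 ≤ data_json.length → ∀ d ∈ data_json,
      (PySem.Dict.get? (⟨d⟩ : PySem.Dict String String) "name").isSome = true) ∧
  ∀ p ∈ data_json.zip data_json.tail, (pvGet p.1 "name" = pvGet p.2 "name" →
      ((PySem.Dict.get? (⟨p.1⟩ : PySem.Dict String String) "time").isSome = true ∧
        2 ≤ (pvSplitDash (pvGet p.2 "time")).length))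
instance (data_json : List (List (String × String))) : Decidable (Pre_table_reduction data_json) := by
  unfold Pre_table_reduction; infer_instance

def pvWitness_table_reduction : (List (List (String × String))) :=
  [[("name", "a"), ("time", "1-2")], [("name", "a"), ("time", "2-3")]]

-- On the singleton list containing the empty dict, A returns [] (its final 'prev == {}' flush guard
-- silently drops the entry) while B returns [{}]; a one-element input should reduce to itself, so
-- B's value is the intended one.
def D_table_reduction (data_json : List (List (String × String))) : Prop := data_json = [[]]
instance (data_json : List (List (String × String))) : Decidable (D_table_reduction data_json) := by
  unfold D_table_reduction; infer_instance

def Spec_table_reduction (data_json : List (List (String × String))) (out : List (List (String × String))) : Prop :=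
  ¬ D_table_reduction data_json → out = table_reduction_alt data_json
instance (data_json : List (List (String × String))) (out : List (List (String × String))) : Decidable (Spec_table_reduction data_json out) := by
  unfold Spec_table_reduction; infer_instance

def pvDiffWitness_table_reduction : (List (List (String × String))) := [[]]
def pvDiffWitnessOut_table_reduction : (List (List (String × String))) × (List (List (String × String))) :=
  ([], [[]])

-- ===== CLAIM (what is proved, stated in full; the proofs are below) =====
def Claim_unchanged_table_reduction : Prop := ∀ (data_json : List (List (String × String))), Dom_table_reduction data_json → Pre_table_reduction data_json → Spec_table_reduction data_json (table_reduction data_json)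
def Claim_changed_table_reduction : Prop := Dom_table_reduction (pvDiffWitness_table_reduction) ∧ Pre_table_reduction (pvDiffWitness_table_reduction) ∧ D_table_reduction (pvDiffWitness_table_reduction) ∧ table_reduction (pvDiffWitness_table_reduction) = pvDiffWitnessOut_table_reduction.1 ∧ table_reduction_alt (pvDiffWitness_table_reduction) = pvDiffWitnessOut_table_reduction.2 ∧ pvDiffWitnessOut_table_reduction.1 ≠ pvDiffWitnessOut_table_reduction.2
def Claim_exact_table_reduction : Prop := ∀ (data_json : List (List (String × String))), Dom_table_reduction data_json → Pre_table_reduction data_json → D_table_reduction data_json → table_reduction data_json ≠ table_reduction_alt data_json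

-- ===== LEMMAS AND PROOFS =====

-- ---- s.split('-') machinery: PySem's splitOn agrees with Mathlib's List.splitOn ----
theorem pv_go_spec (fuel : Nat) : ∀ (l cur : List Char) (acc : List (List Char)), l.length ≤ fuel →
    PySem.Chars.splitOn.go ['-'] fuel l cur acc =
      acc.reverse ++ (List.splitOn '-' l).modifyHead (fun a => cur.reverse ++ a) := by
  induction fuel with
  | zero =>
      intro l cur acc h
      cases l with
      | nil => simp [PySem.Chars.splitOn.go, List.splitOn, List.splitOnP_nil]
      | cons c rest => simp at h
  | succ fuel ih =>
      intro l cur acc h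
      cases l with
      | nil => simp [PySem.Chars.splitOn.go, List.splitOn, List.splitOnP_nil]
      | cons c rest =>
          rw [PySem.Chars.splitOn.go]
          by_cases hc : c = '-'
          · subst hc
            rw [if_pos (by simp [List.isPrefixOf])]
            simp only [List.length_cons, List.drop_succ_cons]
            simp only [List.length_nil, List.drop_zero]
            rw [ih rest [] (cur.reverse :: acc) (by simp at h; omega)]
            have hsp2 : List.splitOn '-' ('-' :: rest) = [] :: List.splitOn '-' rest := by
              simp [List.splitOn, List.splitOnP_cons]
            rw [hsp2]
            cases hsp : List.splitOn '-' rest with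
            | nil => simp
            | cons a t => simp
          · rw [if_neg (by simp [List.isPrefixOf]; exact fun hh => absurd hh.symm hc)]
            rw [ih rest (c :: cur) acc (by simp at h; omega)]
            have hsp2 : List.splitOn '-' (c :: rest) =
                (List.splitOn '-' rest).modifyHead (fun a => c :: a) := by
              simp [List.splitOn, List.splitOnP_cons, hc]
            rw [hsp2]
            cases hsp : List.splitOn '-' rest with
            | nil => simp
            | cons a t => simp
theorem pv_splitOn_chars (s : List Char) :
    PySem.Chars.splitOn s ['-'] = List.splitOn '-' s := by
  unfold PySem.Chars.splitOn
  rw [pv_go_spec (s.length + 1) s [] [] (by omega)]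
  cases hsp : List.splitOn '-' s with
  | nil => simp
  | cons a t => simp

theorem pv_splitDash_eq (t : String) :
    pvSplitDash t = (List.splitOn '-' t.toList).map String.ofList := by
  simp [pvSplitDash, PySem.Str.split?, PySem.Chars.split?, pv_splitOn_chars]

theorem pv_head_no_dash (l : List Char) :
    ∃ h t, List.splitOn '-' l = h :: t ∧ '-' ∉ h := by
  induction l with
  | nil => exact ⟨[], [], by simp [List.splitOn, List.splitOnP_nil], by simp⟩
  | cons c l ih =>
      obtain ⟨h, t, he, hn⟩ := ih
      by_cases hc : c = '-'
      · refine ⟨[], List.splitOn '-' l, ?_, by simp⟩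
        simp [List.splitOn, List.splitOnP_cons, hc]
      · refine ⟨c :: h, t, ?_, ?_⟩
        · simp [List.splitOn, List.splitOnP_cons, hc]
          rw [show List.splitOnP (fun x => x == '-') l = List.splitOn '-' l from rfl, he]
          rfl
        · simp [hn]; exact fun hh => absurd hh.symm hc

theorem pv_collapse_chars (a b : List Char) (h : '-' ∉ a) :
    List.splitOn '-' (a ++ '-' :: b) = a :: List.splitOn '-' b := by
  induction a with
  | nil => simp [List.splitOn, List.splitOnP_cons]
  | cons c a ih =>
      have hc : c ≠ '-' := by intro hh; exact h (by simp [hh])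
      have ha : '-' ∉ a := fun hh => h (by simp [hh])
      simp only [List.cons_append]
      simp [List.splitOn, List.splitOnP_cons, hc]
      rw [show List.splitOnP (fun x => x == '-') (a ++ '-' :: b) =
            List.splitOn '-' (a ++ '-' :: b) from rfl, ih ha]
      rfl

theorem pv_seg_zero (h : String) (t : List String) : pvSeg (h :: t) 0 = h := by
  simp [pvSeg, PySem.List.pyGet?, PySem.List.pyIdx?]

theorem pv_splitDash_shape (t : String) :
    ∃ h rest, pvSplitDash t = h :: rest ∧ '-' ∉ h.toList := by
  obtain ⟨h, r, he, hn⟩ := pv_head_no_dash t.toList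
  exact ⟨String.ofList h, r.map String.ofList, by rw [pv_splitDash_eq, he]; rfl,
    by rw [String.toList_ofList]; exact hn⟩

theorem pv_collapse_str (a b : String) (h : '-' ∉ a.toList) :
    pvSplitDash (a ++ "-" ++ b) = a :: pvSplitDash b := by
  rw [pv_splitDash_eq, pv_splitDash_eq]
  have : (a ++ "-" ++ b).toList = a.toList ++ '-' :: b.toList := by
    simp [String.toList_append]
  rw [this, pv_collapse_chars _ _ h]
  simp [String.ofList_toList]

theorem pv_seg0_append (t b : String) :
    pvSeg (pvSplitDash (pvSeg (pvSplitDash t) 0 ++ "-" ++ b)) 0 = pvSeg (pvSplitDash t) 0 := by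
  obtain ⟨h, rest, he, hn⟩ := pv_splitDash_shape t
  rw [he, pv_seg_zero, pv_collapse_str _ _ hn, pv_seg_zero]

-- ---- dict-merge lemmas ----
theorem pv_get_merge_name (a b : List (String × String)) :
    pvGet (pvMerge a b) "name" = pvGet a "name" := by
  show PySem.Dict.getD (PySem.Dict.insert (⟨a⟩ : PySem.Dict String String) "time"
      (pvSeg (pvSplitDash (pvGet a "time")) 0 ++ "-" ++ pvSeg (pvSplitDash (pvGet b "time")) 1))
      "name" "" = pvGet a "name"
  rw [PySem.Dict.getD_insert]
  simp [pvGet]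

theorem pv_get_merge_time (a b : List (String × String)) :
    pvGet (pvMerge a b) "time" =
      pvSeg (pvSplitDash (pvGet a "time")) 0 ++ "-" ++ pvSeg (pvSplitDash (pvGet b "time")) 1 := by
  show PySem.Dict.getD (PySem.Dict.insert (⟨a⟩ : PySem.Dict String String) "time"
      (pvSeg (pvSplitDash (pvGet a "time")) 0 ++ "-" ++ pvSeg (pvSplitDash (pvGet b "time")) 1))
      "time" "" = _
  rw [PySem.Dict.getD_insert]
  simp

theorem pv_merge_ne_nil (a b : List (String × String)) : pvMerge a b ≠ [] := by
  unfold pvMerge PySem.Dict.insert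
  split
  · next hc =>
      cases a with
      | nil => simp [PySem.Dict.contains] at hc
      | cons p l => simp
  · simp

theorem pv_insert_insert (d : PySem.Dict String String) (k v w : String) :
    (d.insert k v).insert k w = d.insert k w := by
  have h1 : ((d.insert k v).insert k w).items = (d.insert k w).items := by
    rw [PySem.Dict.items_insert_of_contains _ _ (PySem.Dict.contains_insert_self d k v)]
    by_cases hc : d.contains k = true
    · rw [PySem.Dict.items_insert_of_contains _ _ hc, PySem.Dict.items_insert_of_contains _ _ hc]
      simp only [List.map_map]
      apply List.map_congr_left
      intro p _
      by_cases hp : p.1 = k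
      · simp [hp]
      · simp [hp]
    · have hcf : d.contains k = false := by simpa using hc
      rw [PySem.Dict.items_insert_of_not_contains _ _ hcf,
        PySem.Dict.items_insert_of_not_contains _ _ hcf]
      rw [List.map_append]
      have hmap : d.items.map (fun p => if (p.1 == k) = true then (k, w) else p) = d.items := by
        conv_rhs => rw [show d.items = d.items.map id from (List.map_id d.items).symm]
        apply List.map_congr_left
        intro p hp
        have hpk : (p.1 == k) = false := by
          by_contra hne
          simp only [Bool.not_eq_false] at hne
          have : d.contains k = true := by
            unfold PySem.Dict.contains
            exact List.any_eq_true.mpr ⟨p, hp, hne⟩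
          rw [this] at hcf; exact absurd hcf (by simp)
        simp [hpk]
      rw [hmap]
      simp
  calc (d.insert k v).insert k w = ⟨((d.insert k v).insert k w).items⟩ := rfl
    _ = ⟨(d.insert k w).items⟩ := by rw [h1]
    _ = d.insert k w := rfl

theorem pv_merge_merge (a b c : List (String × String)) :
    pvMerge (pvMerge a b) c = pvMerge a c := by
  conv_lhs => rw [pvMerge]
  rw [pv_get_merge_time a b, pv_seg0_append]
  rw [show (⟨pvMerge a b⟩ : PySem.Dict String String) =
        PySem.Dict.insert (⟨a⟩ : PySem.Dict String String) "time"
          (pvSeg (pvSplitDash (pvGet a "time")) 0 ++ "-" ++ pvSeg (pvSplitDash (pvGet b "time")) 1) from rfl]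
  rw [pv_insert_insert]
  rfl

-- ---- common run-structured form of both ports ----
def finA : List (List (String × String)) → List (String × String) → List (List (String × String))
  | [], prev => if prev = [] then [] else [prev]
  | i :: rest, prev =>
      if pvGet i "name" = pvGet prev "name" then finA rest (pvMerge prev i)
      else prev :: finA rest i

def finB : List (List (String × String)) → List (List (String × String))
  | [] => []
  | x :: rest =>
      (if rest.takeWhile (fun y => pvGet y "name" == pvGet x "name") = [] then x
       else pvMerge x ((rest.takeWhile (fun y => pvGet y "name" == pvGet x "name")).getLastD [])) ::
        finB (rest.dropWhile (fun y => pvGet y "name" == pvGet x "name"))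
termination_by l => l.length
decreasing_by
  simp only [List.length_cons]
  have := List.length_dropWhile_le (fun y => pvGet y "name" == pvGet x "name") rest
  omega

theorem pv_foldl_merge (rs : List (List (String × String))) :
    ∀ (r x : List (String × String)),
      List.foldl pvMerge x (r :: rs) = pvMerge x ((r :: rs).getLastD []) := by
  induction rs with
  | nil => intro r x; simp [List.foldl]
  | cons r2 rs ih =>
      intro r x
      show List.foldl pvMerge (pvMerge x r) (r2 :: rs) = _
      rw [ih r2 (pvMerge x r), pv_merge_merge]
      rfl

theorem pv_foldl_name (run : List (List (String × String))) :
    ∀ x, pvGet (List.foldl pvMerge x run) "name" = pvGet x "name" := by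
  induction run with
  | nil => intro x; rfl
  | cons r rs ih =>
      intro x
      show pvGet (List.foldl pvMerge (pvMerge x r) rs) "name" = _
      rw [ih (pvMerge x r), pv_get_merge_name]

theorem pv_foldl_ne_nil (run : List (List (String × String))) (x : List (String × String))
    (hx : x ≠ []) : List.foldl pvMerge x run ≠ [] := by
  cases run with
  | nil => exact hx
  | cons r rs => rw [pv_foldl_merge]; exact pv_merge_ne_nil _ _

theorem pv_finA_run : ∀ (run t : List (List (String × String))) (x : List (String × String)),
    (∀ y ∈ run, pvGet y "name" = pvGet x "name") →
    finA (run ++ t) x = finA t (List.foldl pvMerge x run) := by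
  intro run
  induction run with
  | nil => intro t x _; rfl
  | cons r rs ih =>
      intro t x hall
      have hr : pvGet r "name" = pvGet x "name" := hall r (by simp)
      show finA (r :: (rs ++ t)) x = _
      rw [finA]
      rw [if_pos hr]
      rw [ih t (pvMerge x r) (fun y hy => by
        rw [pv_get_merge_name]; exact hall y (by simp [hy]))]
      rfl

theorem pv_dropWhile_head_false (p : List (String × String) → Bool)
    (l : List (List (String × String))) (x : List (String × String))
    (t : List (List (String × String))) (h : l.dropWhile p = x :: t) : p x = false := by
  induction l with
  | nil => simp at h
  | cons a l ih =>
      rw [List.dropWhile_cons] at h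
      by_cases hp : p a = true
      · rw [if_pos hp] at h; exact ih h
      · rw [if_neg hp] at h
        cases h
        simpa using hp

theorem pv_finA_eq_finB (l : List (List (String × String))) (x : List (String × String))
    (hl : ∀ d ∈ l, d ≠ []) (hx : x ≠ []) : finA l x = finB (x :: l) := by
  have hsplit : l.takeWhile (fun y => pvGet y "name" == pvGet x "name") ++
      l.dropWhile (fun y => pvGet y "name" == pvGet x "name") = l :=
    List.takeWhile_append_dropWhile
  have hrun : ∀ y ∈ l.takeWhile (fun y => pvGet y "name" == pvGet x "name"),
      pvGet y "name" = pvGet x "name" := by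
    intro y hy
    have := List.mem_takeWhile_imp hy
    simpa using this
  conv_lhs => rw [← hsplit]
  rw [pv_finA_run _ _ _ hrun]
  rw [finB]
  have hPname : pvGet (List.foldl pvMerge x
      (l.takeWhile (fun y => pvGet y "name" == pvGet x "name"))) "name" = pvGet x "name" :=
    pv_foldl_name _ x
  have hPne : List.foldl pvMerge x (l.takeWhile (fun y => pvGet y "name" == pvGet x "name")) ≠ [] :=
    pv_foldl_ne_nil _ x hx
  have hhead : (if l.takeWhile (fun y => pvGet y "name" == pvGet x "name") = [] then x
       else pvMerge x ((l.takeWhile (fun y => pvGet y "name" == pvGet x "name")).getLastD [])) =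
      List.foldl pvMerge x (l.takeWhile (fun y => pvGet y "name" == pvGet x "name")) := by
    cases hr : l.takeWhile (fun y => pvGet y "name" == pvGet x "name") with
    | nil => simp
    | cons r rs => rw [pv_foldl_merge]; simp
  rw [hhead]
  cases ht : l.dropWhile (fun y => pvGet y "name" == pvGet x "name") with
  | nil =>
      rw [finA, if_neg hPne, finB]
  | cons r2 t2 =>
      have hp : (pvGet r2 "name" == pvGet x "name") = false :=
        pv_dropWhile_head_false _ l r2 t2 ht
      have hne : ¬ pvGet r2 "name" =
          pvGet (List.foldl pvMerge x (l.takeWhile (fun y => pvGet y "name" == pvGet x "name"))) "name" := by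
        rw [hPname]
        intro hh
        rw [hh] at hp
        simp at hp
      rw [finA, if_neg hne]
      have hsub : ∀ d ∈ r2 :: t2, d ∈ l := by
        intro d hd
        exact (List.dropWhile_sublist _).subset (ht ▸ hd)
      have hrec : finA t2 r2 = finB (r2 :: t2) :=
        pv_finA_eq_finB t2 r2 (fun d hd => hl d (hsub d (by simp [hd])))
          (hl r2 (hsub r2 (by simp)))
      rw [hrec]
termination_by l.length
decreasing_by
  have h1 := List.length_dropWhile_le (fun y => pvGet y "name" == pvGet x "name") l
  rw [ht] at h1
  simp at h1
  omega

-- ---- port A computes finA ----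
theorem pv_goA_spec : ∀ (l baru : List (List (String × String))) (prev : List (String × String))
    (idx : Nat), 0 < idx →
    (if (goA l idx (baru, prev)).2 = [] then (goA l idx (baru, prev)).1
     else (goA l idx (baru, prev)).1 ++ [(goA l idx (baru, prev)).2]) = baru ++ finA l prev := by
  intro l
  induction l with
  | nil =>
      intro baru prev idx _
      show (if prev = [] then baru else baru ++ [prev]) = baru ++ finA [] prev
      rw [finA]
      split <;> simp_all
  | cons i rest ih =>
      intro baru prev idx hidx
      have hstep : goA (i :: rest) idx (baru, prev)
          = goA rest (idx + 1)
              (if 0 < idx then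
                 (if pvGet i "name" = pvGet prev "name" then (baru, pvMerge prev i)
                  else (baru ++ [prev], i))
               else (baru, i)) := rfl
      rw [hstep, if_pos hidx]
      by_cases hn : pvGet i "name" = pvGet prev "name"
      · rw [if_pos hn, ih baru (pvMerge prev i) (idx + 1) (by omega), finA, if_pos hn]
      · rw [if_neg hn, ih (baru ++ [prev]) i (idx + 1) (by omega), finA, if_neg hn]
        simp

theorem pv_A_eq_finA (xs : List (List (String × String))) :
    table_reduction xs = match xs with | [] => [] | x :: rest => finA rest x := by
  cases xs with
  | nil => rfl
  | cons x rest =>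
      show (if (goA rest 1 ([], x)).2 = [] then (goA rest 1 ([], x)).1
            else (goA rest 1 ([], x)).1 ++ [(goA rest 1 ([], x)).2]) = finA rest x
      simpa using pv_goA_spec rest [] x 1 (by omega)

-- ---- port B computes finB ----
theorem pv_runEnd_spec (xs : List (List (String × String))) (nm : String) :
    ∀ (fuel j : Nat), xs.length ≤ j + fuel →
      runEndB xs nm fuel j =
        j + ((xs.drop j).takeWhile (fun y => pvGet y "name" == nm)).length := by
  intro fuel
  induction fuel with
  | zero =>
      intro j h
      rw [runEndB, List.drop_eq_nil_of_le (by omega)]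
      simp
  | succ fuel ih =>
      intro j h
      rw [runEndB]
      by_cases h1 : j < xs.length
      · rw [dif_pos h1, List.drop_eq_getElem_cons h1, List.takeWhile_cons]
        by_cases hn : pvGet xs[j] "name" = nm
        · rw [if_pos hn, ih (j + 1) (by omega)]
          have : (pvGet xs[j] "name" == nm) = true := by simp [hn]
          rw [this]
          simp
          omega
        · rw [if_neg hn]
          have : (pvGet xs[j] "name" == nm) = false := by simp [hn]
          rw [this]
          simp
      · rw [dif_neg h1, List.drop_eq_nil_of_le (by omega)]
        simp

theorem pv_last_elem (xs : List (List (String × String))) (k : Nat)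
    (r : List (String × String)) (rs rest' : List (List (String × String)))
    (hsplit2 : xs.drop (k + 1) = (r :: rs) ++ rest') :
    (PySem.List.pyGet? xs (((k + 1 + (r :: rs).length : Nat) : Int) - 1)).getD []
      = (r :: rs).getLastD [] := by
  have hcast : ((k + 1 + (r :: rs).length : Nat) : Int) - 1 = ((k + 1 + rs.length : Nat) : Int) := by
    simp only [List.length_cons]
    push_cast
    omega
  rw [hcast, PySem.List.pyGet?_natCast]
  have hget : xs[k + 1 + rs.length]? = ((r :: rs) ++ rest')[rs.length]? := by
    rw [← hsplit2, List.getElem?_drop]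
  rw [hget, List.getElem?_append_left (by simp)]
  rw [List.getLastD_eq_getLast?, List.getLast?_eq_getElem?]
  simp

theorem pv_goB_spec (xs : List (List (String × String))) :
    ∀ (fuel k : Nat) (acc : List (List (String × String))), xs.length ≤ k + fuel →
      goB xs fuel k acc = acc ++ finB (xs.drop k) := by
  intro fuel
  induction fuel with
  | zero =>
      intro k acc h
      rw [goB, List.drop_eq_nil_of_le (by omega), finB]
      simp
  | succ fuel ih =>
      intro k acc h
      rw [goB]
      by_cases hk : k < xs.length
      · rw [dif_pos hk]
        show goB xs fuel (runEndB xs (pvGet xs[k] "name") xs.length (k + 1))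
            (acc ++ [if k + 1 < runEndB xs (pvGet xs[k] "name") xs.length (k + 1) then
                pvMerge xs[k] ((PySem.List.pyGet? xs
                  ((runEndB xs (pvGet xs[k] "name") xs.length (k + 1) : Int) - 1)).getD [])
              else xs[k]]) = acc ++ finB (xs.drop k)
        rw [pv_runEnd_spec xs (pvGet xs[k] "name") xs.length (k + 1) (by omega)]
        have hlenrun : ((xs.drop (k + 1)).takeWhile
              (fun y => pvGet y "name" == pvGet xs[k] "name")).length
            + ((xs.drop (k + 1)).dropWhile
              (fun y => pvGet y "name" == pvGet xs[k] "name")).length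
            = xs.length - (k + 1) := by
          rw [← List.length_append, List.takeWhile_append_dropWhile, List.length_drop]
        set run := (xs.drop (k + 1)).takeWhile (fun y => pvGet y "name" == pvGet xs[k] "name")
          with hrundef
        set rest' := (xs.drop (k + 1)).dropWhile (fun y => pvGet y "name" == pvGet xs[k] "name")
          with hrestdef
        have hsplit2 : xs.drop (k + 1) = run ++ rest' := (List.takeWhile_append_dropWhile).symm
        rw [ih (k + 1 + run.length) _ (by omega)]
        conv_rhs => rw [List.drop_eq_getElem_cons hk]
        rw [finB]
        have hdrop : xs.drop (k + 1 + run.length) = rest' := by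
          have h1 : (xs.drop (k + 1)).drop run.length = xs.drop (k + 1 + run.length) :=
            List.drop_drop
          rw [← h1, hsplit2, List.drop_left]
        rw [hdrop]
        have hfirst : (if k + 1 < k + 1 + run.length then
              pvMerge xs[k] ((PySem.List.pyGet? xs (((k + 1 + run.length : Nat) : Int) - 1)).getD [])
            else xs[k]) = (if run = [] then xs[k] else pvMerge xs[k] (run.getLastD [])) := by
          cases hrc : run with
          | nil => simp
          | cons r rs =>
              rw [if_pos (by simp only [List.length_cons]; omega), if_neg (by simp)]
              rw [pv_last_elem xs k r rs rest' (by rw [hsplit2, hrc])]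
        rw [hfirst, ← hrundef, ← hrestdef, List.append_assoc]
        rfl
      · rw [dif_neg hk, List.drop_eq_nil_of_le (by omega), finB]
        simp

theorem pv_B_eq_finB (xs : List (List (String × String))) :
    table_reduction_alt xs = finB xs := by
  show goB xs xs.length 0 [] = finB xs
  rw [pv_goB_spec xs xs.length 0 [] (by omega)]
  simp

-- ---- assembling the verdict ----
theorem pv_ne_nil_of_name (d : List (String × String))
    (h : (PySem.Dict.get? (⟨d⟩ : PySem.Dict String String) "name").isSome = true) : d ≠ [] := by
  intro hd
  subst hd
  simp [PySem.Dict.get?] at h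

-- ===== VERDICT (by name: the statement is the Claim_ definition above) =====
theorem table_reduction_spec : Claim_unchanged_table_reduction := by
  intro xs hdom hpre hnd
  rw [pv_A_eq_finA, pv_B_eq_finB]
  cases xs with
  | nil => simp [finB]
  | cons x rest =>
      show finA rest x = finB (x :: rest)
      cases rest with
      | nil =>
          refine pv_finA_eq_finB [] x (fun d hd => absurd hd (by simp)) ?_
          intro hxnil
          subst hxnil
          exact hnd rfl
      | cons r rs =>
          have hlen : 2 ≤ (x :: r :: rs).length := by simp
          have hall := hpre.1 hlen
          apply pv_finA_eq_finB
          · intro d hd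
            exact pv_ne_nil_of_name d (hall d (by simp [hd]))
          · exact pv_ne_nil_of_name x (hall x (by simp))
theorem table_reduction_changed : Claim_changed_table_reduction := by
  unfold Claim_changed_table_reduction; decide
theorem table_reduction_tight : Claim_exact_table_reduction := by
  intro xs _ _ hd
  have hxs : xs = [[]] := hd
  rw [hxs]
  decide
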